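-- pv_equiv track=rewrite | github.com/Pe-Santana/5Periodo | Recuperação de Informação/Python/TP4/ex3.py | frequenciaTermos
-- ===== SOURCE A (Python) =====
-- def frequenciaTermos(vocabulario, tweets):
--     bagOfWords = []
--     bagOfTweeets = []
--     for tweet in tweets:
--         tweet = tweet.split()
--         for elemento in vocabulario:
--             if elemento in tweet:
--                 bagOfWords.append(tweet.count(elemento))
--
--             else:
--                 bagOfWords.append(0)
--
--         bagOfTweeets.append(bagOfWords)
--         bagOfWords = []
--
--     return bagOfTweeets
-- ===== SOURCE B (Python) =====
-- def frequenciaTermos(vocabulario, tweets):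
--     # Inverted traversal: build once a positions index (term -> list of row
--     # positions), then per tweet increment a zero-filled row per word.
--     index = {}
--     for termo, i in zip(vocabulario, range(len(vocabulario))):
--         index.setdefault(termo, []).append(i)
--     resultado = []
--     for tweet in tweets:
--         linha = [0] * len(vocabulario)
--         for palavra in tweet.split():
--             for i in index.get(palavra, []):
--                 linha[i] += 1
--         resultado.append(linha)
--     return resultado
-- ===== Notes on version B (the rewrite author's own statement) =====
-- stated objective: alternative
-- what changed: B inverts the traversal: it precomputes once an index from each vocabulary term to the list of its row positions, then for each tweet fills a zero row by looping over the tweet's words and incrementing the mapped positions, instead of A's per-tweet loop over the vocabulary with a membership test and a count() scan per term.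
import Mathlib
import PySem

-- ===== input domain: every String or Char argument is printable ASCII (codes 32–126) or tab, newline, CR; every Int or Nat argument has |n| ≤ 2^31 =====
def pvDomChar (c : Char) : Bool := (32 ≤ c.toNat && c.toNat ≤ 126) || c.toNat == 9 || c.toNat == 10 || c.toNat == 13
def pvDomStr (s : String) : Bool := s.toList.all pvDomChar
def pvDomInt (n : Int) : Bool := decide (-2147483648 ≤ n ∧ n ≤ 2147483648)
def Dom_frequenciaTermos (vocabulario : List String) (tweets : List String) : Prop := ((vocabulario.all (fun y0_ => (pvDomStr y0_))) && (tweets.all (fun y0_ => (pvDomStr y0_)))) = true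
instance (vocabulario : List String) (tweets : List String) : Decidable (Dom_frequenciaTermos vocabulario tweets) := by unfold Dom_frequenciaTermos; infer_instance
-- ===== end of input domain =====

-- B inverts the traversal: one vocabulary-position index built up front, then per
-- tweet a zero row incremented per word (objective: alternative decomposition).

-- ===== PORT A =====
def frequenciaTermos (vocabulario : List String) (tweets : List String) : List (List Int) :=
  tweets.foldl
    (fun bagOfTweeets tweet =>
      let t := PySem.Str.split₀ tweet
      let bagOfWords := vocabulario.foldl
        (fun bagOfWords elemento =>
          if elemento ∈ t then bagOfWords ++ [((PySem.List.count t elemento : Nat) : Int)]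
          else bagOfWords ++ [(0 : Int)])
        []
      bagOfTweeets ++ [bagOfWords])
    []

-- ===== PORT B =====
-- `index.setdefault(termo, []).append(i)` is exactly Dict.modify termo [] (· ++ [i]);
-- `range(len(vocabulario))` yields the list positions, ported as List.range (Nat indices,
-- all nonnegative and in range, so `linha[i] += 1` is List.modify i (· + 1)).
def frequenciaTermos_alt (vocabulario : List String) (tweets : List String) : List (List Int) :=
  let index : PySem.Dict String (List Nat) :=
    (vocabulario.zip (List.range vocabulario.length)).foldl
      (fun d p => d.modify p.1 [] (· ++ [p.2])) PySem.Dict.empty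
  tweets.foldl
    (fun resultado tweet =>
      let linha := (PySem.Str.split₀ tweet).foldl
        (fun linha palavra =>
          (index.getD palavra []).foldl (fun linha i => linha.modify i (· + 1)) linha)
        (List.replicate vocabulario.length (0 : Int))
      resultado ++ [linha])
    []

-- ===== PRECONDITION & SPEC =====
def Spec_frequenciaTermos (vocabulario : List String) (tweets : List String) (out : List (List Int)) : Prop := out = frequenciaTermos_alt vocabulario tweets
instance (vocabulario : List String) (tweets : List String) (out : List (List Int)) : Decidable (Spec_frequenciaTermos vocabulario tweets out) := by unfold Spec_frequenciaTermos; infer_instance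

-- ===== CLAIM (what is proved, stated in full; the proofs are below) =====
def Claim_equal_frequenciaTermos : Prop := ∀ (vocabulario : List String) (tweets : List String), Dom_frequenciaTermos vocabulario tweets → Spec_frequenciaTermos vocabulario tweets (frequenciaTermos vocabulario tweets)

-- ===== LEMMAS AND PROOFS =====

-- A's inner loop body always appends the count (it is 0 when the term is absent).
theorem pv_row_fun_eq (t : List String) :
    (fun (row : List Int) (e : String) =>
        if e ∈ t then row ++ [((PySem.List.count t e : Nat) : Int)] else row ++ [(0 : Int)])
      = fun row e => row ++ [((PySem.List.count t e : Nat) : Int)] := by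
  funext row e
  by_cases h : e ∈ t
  · simp [h]
  · simp [h, PySem.List.count_eq, List.count_eq_zero_of_not_mem h]

-- After the increment loop over a list of positions, entry j has grown by the
-- number of occurrences of j among the positions.
theorem pv_inc_get? (ps : List Nat) (r : List Int) (j : Nat) :
    (ps.foldl (fun r i => r.modify i (· + 1)) r)[j]?
      = r[j]?.map (· + (ps.count j : Int)) := by
  induction ps generalizing r with
  | nil => cases h : r[j]? <;> simp [h]
  | cons a t ih =>
      rw [List.foldl_cons, ih, List.getElem?_modify, List.count_cons]
      cases h : r[j]? with
      | none => simp
      | some v =>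
          by_cases hja : a = j <;> simp [hja] <;> omega

-- After the word loop, entry j has grown by the sum of per-word occurrence counts of j.
theorem pv_words_get? (pos : String → List Nat) (ws : List String) (r : List Int) (j : Nat) :
    (ws.foldl (fun r w => (pos w).foldl (fun r i => r.modify i (· + 1)) r) r)[j]?
      = r[j]?.map (· + (ws.map (fun w => ((pos w).count j : Int))).sum) := by
  induction ws generalizing r with
  | nil => cases h : r[j]? <;> simp [h]
  | cons w t ih =>
      rw [List.foldl_cons, ih, pv_inc_get?]
      cases h : r[j]? <;> simp [h] <;> ring

-- In a pair list with distinct second components, the positions mapped to a key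
-- contain j once when (w, j) is a pair and never otherwise.
theorem pv_count_snd (L : List (String × Nat)) (hnd : (L.map Prod.snd).Nodup)
    (w : String) (j : Nat) :
    ((L.filter (fun p => p.1 == w)).map Prod.snd).count j
      = if (w, j) ∈ L then 1 else 0 := by
  induction L with
  | nil => simp
  | cons p t ih =>
      obtain ⟨a, b⟩ := p
      simp only [List.map_cons, List.nodup_cons] at hnd
      obtain ⟨hb, hnt⟩ := hnd
      by_cases hw : a = w
      · rw [List.filter_cons_of_pos (by simp [hw])]
        by_cases hbj : b = j
        · have h0 : ((t.filter (fun p => p.1 == w)).map Prod.snd).count j = 0 := by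
            rw [List.count_eq_zero]
            intro hmem
            obtain ⟨q, hq, hq2⟩ := List.mem_map.1 hmem
            exact hb (by
              subst hbj; rw [← hq2]
              exact List.mem_map_of_mem (List.mem_of_mem_filter hq))
          simp [h0, hbj, hw]
        · have hne : ¬ ((w, j) = (a, b)) := by simp [Prod.ext_iff]; intro _; omega
          simp [ih hnt, List.mem_cons, hne, show ¬ (b = j) from hbj]
      · rw [List.filter_cons_of_neg (by simp [hw])]
        have hne : ¬ ((w, j) = (a, b)) := by
          simp [Prod.ext_iff]; intro h; exact absurd h.symm hw
        simp [ih hnt, List.mem_cons, hne]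

-- The positions the index stores for w are exactly the j with vocabulario[j] = w.
theorem pv_index_count (voc : List String) (w : String) (j : Nat) (hj : j < voc.length) :
    (((voc.zip (List.range voc.length)).foldl
        (fun d p => d.modify p.1 [] (· ++ [p.2])) PySem.Dict.empty).getD w []).count j
      = if voc[j] = w then 1 else 0 := by
  rw [PySem.Dict.getD_foldl_modify_append]
  have hz : voc.zip (List.range voc.length) = voc.zipIdx := by
    rw [List.zipIdx_eq_zip_range', List.range_eq_range']
  rw [hz]
  have hnd : (voc.zipIdx.map Prod.snd).Nodup := by
    rw [← hz, List.map_snd_zip (by simp)]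
    exact List.nodup_range
  rw [show (PySem.Dict.empty.getD w ([] : List Nat)) = [] from rfl, List.nil_append,
    pv_count_snd voc.zipIdx hnd w j]
  have hmem : (w, j) ∈ voc.zipIdx ↔ voc[j] = w := by
    rw [List.mem_zipIdx_iff_getElem?]
    simp [List.getElem?_eq_getElem hj, eq_comm]
  by_cases h : voc[j] = w
  · rw [if_pos (hmem.2 h), if_pos h]
  · rw [if_neg (fun hm => h (hmem.1 hm)), if_neg h]

-- B's row for one tweet equals A's row: the count of each vocabulary term.
theorem pv_row_eq (voc : List String) (ws : List String) :
    (ws.foldl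
        (fun linha palavra =>
          ((((voc.zip (List.range voc.length)).foldl
              (fun d p => d.modify p.1 [] (· ++ [p.2])) PySem.Dict.empty).getD palavra []).foldl
            (fun linha i => linha.modify i (· + 1)) linha))
        (List.replicate voc.length (0 : Int)))
      = voc.map (fun e => ((ws.count e : Nat) : Int)) := by
  apply List.ext_getElem?
  intro j
  rw [pv_words_get?, List.getElem?_replicate, List.getElem?_map]
  by_cases hj : j < voc.length
  · rw [List.getElem?_eq_getElem hj]
    simp only [if_pos hj, Option.map_some]
    congr 1
    have hfun : ∀ w, ((((voc.zip (List.range voc.length)).foldl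
          (fun d p => d.modify p.1 [] (· ++ [p.2])) PySem.Dict.empty).getD w []).count j : Int)
        = if (voc[j] == w) = true then (1 : Int) else 0 := by
      intro w
      rw [pv_index_count voc w j hj]
      by_cases h : voc[j] = w <;> simp [h]
    calc (0 : Int) + (ws.map (fun w =>
            ((((voc.zip (List.range voc.length)).foldl
              (fun d p => d.modify p.1 [] (· ++ [p.2])) PySem.Dict.empty).getD w []).count j : Int))).sum
        = (ws.map (fun w => if (voc[j] == w) = true then (1 : Int) else 0)).sum := by
          rw [zero_add]; congr 1; exact List.map_congr_left (fun w _ => hfun w)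
      _ = ((ws.countP (fun w => voc[j] == w) : Nat) : Int) :=
          PySem.List.sum_map_ite_one_zero _ ws
      _ = ((ws.count voc[j] : Nat) : Int) := by
          rw [List.count_eq_countP]
          congr 1
          exact List.countP_congr (fun x _ => by simp only [beq_iff_eq]; exact eq_comm)
  · rw [List.getElem?_eq_none_iff.2 (by simpa using hj)]
    simp [hj]

-- ===== VERDICT (by name: the statement is the Claim_ definition above) =====
theorem frequenciaTermos_spec : Claim_equal_frequenciaTermos := by
  intro vocabulario tweets _
  unfold Spec_frequenciaTermos frequenciaTermos frequenciaTermos_alt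
  rw [PySem.List.foldl_append_singleton_eq_map, PySem.List.foldl_append_singleton_eq_map]
  simp only [List.nil_append]
  congr 1
  funext tweet
  rw [pv_row_fun_eq, PySem.List.foldl_append_singleton_eq_map]
  simp only [List.nil_append]
  exact (pv_row_eq vocabulario (PySem.Str.split₀ tweet)).symm
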